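-- pv_equiv track=rewrite | github.com/anonymous-code-disk/dash-dts | dialogue_dataset.py | _boundaries_to_segments
-- ===== SOURCE A (Python) =====
-- from typing import List
--
-- def _boundaries_to_segments(boundaries: List[int], total_length: int) -> List[int]:
--     # Boundaries mark the end of a segment at position i (usually between i and i+1)
--     # We assume boundaries length equals total_length; last position should be 0.
--     segments: List[int] = []
--     if total_length <= 0:
--         return segments
--     count = 1
--     for i in range(1, total_length):
--         if i - 1 < len(boundaries) and boundaries[i - 1] == 1:
--             segments.append(count)
--             count = 1
--         else:
--             count += 1
--     segments.append(count)
--     return segments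
-- ===== SOURCE B (Python) =====
-- from typing import List
--
-- def _boundaries_to_segments(boundaries: List[int], total_length: int) -> List[int]:
--     # Build the segment list back-to-front: walk the boundary positions right-to-left;
--     # a boundary starts a fresh length-1 segment in front, otherwise the current front
--     # segment grows by one. No running counter, no append-at-the-end.
--     if total_length <= 0:
--         return []
--     segments = [1]
--     for i in range(total_length - 2, -1, -1):
--         if i < len(boundaries) and boundaries[i] == 1:
--             segments.insert(0, 1)
--         else:
--             segments[0] += 1
--     return segments
-- ===== Notes on version B (the rewrite author's own statement) =====
-- stated objective: alternative
-- what changed: Replaces A's forward accumulate-and-reset counter loop (append a finished count, reset to 1) by a right-to-left pass that builds the segment list back-to-front: each boundary prepends a fresh length-1 segment, otherwise the front segment is bumped; no running counter and no trailing append.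
import Mathlib
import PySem

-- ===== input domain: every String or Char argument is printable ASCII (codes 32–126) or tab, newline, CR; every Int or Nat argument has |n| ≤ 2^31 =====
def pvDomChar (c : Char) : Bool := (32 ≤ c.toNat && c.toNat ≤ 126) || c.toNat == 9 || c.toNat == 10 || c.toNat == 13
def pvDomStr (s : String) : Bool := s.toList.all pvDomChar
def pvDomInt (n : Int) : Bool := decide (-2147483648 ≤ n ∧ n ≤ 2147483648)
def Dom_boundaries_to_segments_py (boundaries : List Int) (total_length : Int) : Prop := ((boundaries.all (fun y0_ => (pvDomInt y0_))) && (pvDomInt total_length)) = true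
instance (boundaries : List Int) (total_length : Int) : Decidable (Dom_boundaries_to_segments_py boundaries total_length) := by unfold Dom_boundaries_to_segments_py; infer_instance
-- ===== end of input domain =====

-- B replaces A's forward accumulate-and-reset counter loop by a right-to-left pass that builds
-- the segment list back-to-front (objective: alternative decomposition; no speed claim).

-- ===== PORT A =====
-- Transliteration of A's loop: state (segments, count); Python's short-circuit `and` becomes
-- Bool `&&`, and pyGet? is exact for the in-range nonnegative index i-1.
def boundaries_to_segments_py (boundaries : List Int) (total_length : Int) : List Int :=
  if total_length ≤ 0 then []
  else
    let st := (PySem.List.pyRange 1 total_length 1).foldl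
      (fun (p : List Int × Int) i =>
        if (decide (i - 1 < (boundaries.length : Int)) &&
            (PySem.List.pyGet? boundaries (i - 1) == some (1 : Int))) = true
        then (p.1 ++ [p.2], 1)
        else (p.1, p.2 + 1)) ([], 1)
    st.1 ++ [st.2]

-- ===== PORT B =====
-- Transliteration of Source B: the backward loop range(total_length-2, -1, -1) is pyRange with step -1;
-- segments.insert(0, 1) is a prepend; segments[0] += 1 is the match bumping the head (segments is
-- provably nonempty throughout — it starts as [1] — so Python's segments[0] never raises; the []
-- arm is unreachable).
def boundaries_to_segments_py_alt (boundaries : List Int) (total_length : Int) : List Int :=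
  if total_length ≤ 0 then []
  else
    (PySem.List.pyRange (total_length - 2) (-1) (-1)).foldl
      (fun (segments : List Int) i =>
        if (decide (i < (boundaries.length : Int)) &&
            (PySem.List.pyGet? boundaries i == some (1 : Int))) = true
        then 1 :: segments
        else match segments with
             | h :: t => (h + 1) :: t
             | [] => []) [1]

-- ===== PRECONDITION & SPEC =====
def Spec_boundaries_to_segments_py (boundaries : List Int) (total_length : Int) (out : List Int) : Prop := out = boundaries_to_segments_py_alt boundaries total_length
instance (boundaries : List Int) (total_length : Int) (out : List Int) : Decidable (Spec_boundaries_to_segments_py boundaries total_length out) := by unfold Spec_boundaries_to_segments_py; infer_instance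

-- ===== CLAIM (what is proved, stated in full; the proofs are below) =====
def Claim_equal_boundaries_to_segments_py : Prop := ∀ (boundaries : List Int) (total_length : Int), Dom_boundaries_to_segments_py boundaries total_length → Spec_boundaries_to_segments_py boundaries total_length (boundaries_to_segments_py boundaries total_length)

-- ===== LEMMAS AND PROOFS =====

-- A's loop step, abstracted over the boolean flag "cut here"
def pvStep (p : List Int × Int) (b : Bool) : List Int × Int :=
  if b then (p.1 ++ [p.2], 1) else (p.1, p.2 + 1)

-- A's result on a list of cut flags, with initial count c
def pvRes (bl : List Bool) (c : Int) : List Int :=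
  let s := bl.foldl pvStep ([], c)
  s.1 ++ [s.2]

-- B's loop step, abstracted over the boolean flag
def pvBStep (segs : List Int) (b : Bool) : List Int :=
  if b then 1 :: segs
  else match segs with
       | h :: t => (h + 1) :: t
       | [] => []

-- reference recursion on the flag list
def pvSpecR : List Bool → List Int
  | [] => [1]
  | b :: bl =>
      if b then 1 :: pvSpecR bl
      else match pvSpecR bl with
           | r :: rs => (r + 1) :: rs
           | [] => []

-- the cut flag at boundary index i, as B tests it
def pvQ (bs : List Int) (i : Int) : Bool :=
  decide (i < (bs.length : Int)) && (PySem.List.pyGet? bs i == some (1 : Int))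

-- the cut flag at loop position i, as A tests it
def pvP (bs : List Int) (i : Int) : Bool :=
  decide (i - 1 < (bs.length : Int)) && (PySem.List.pyGet? bs (i - 1) == some (1 : Int))

-- the flag list both loops effectively traverse
def pvFlags (bs : List Int) (tl : Int) : List Bool :=
  (PySem.List.pyRange 0 (tl - 1) 1).map (pvQ bs)

theorem pvSpecR_ne_nil (bl : List Bool) : pvSpecR bl ≠ [] := by
  induction bl with
  | nil => simp [pvSpecR]
  | cons b bl ih =>
    simp only [pvSpecR]
    split
    · simp
    · cases h : pvSpecR bl with
      | nil => exact absurd h ih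
      | cons r rs => simp

theorem pvFoldl_prefix (bl : List Bool) (pre : List Int) (c : Int) :
    bl.foldl pvStep (pre, c)
      = (pre ++ (bl.foldl pvStep ([], c)).1, (bl.foldl pvStep ([], c)).2) := by
  induction bl generalizing pre c with
  | nil => simp
  | cons b bl ih =>
    cases b with
    | false =>
      have h1 : pvStep (pre, c) false = (pre, c + 1) := rfl
      have h2 : pvStep (([] : List Int), c) false = ([], c + 1) := rfl
      rw [List.foldl_cons, List.foldl_cons, h1, h2]
      exact ih pre (c + 1)
    | true =>
      have h1 : pvStep (pre, c) true = (pre ++ [c], 1) := rfl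
      have h2 : pvStep (([] : List Int), c) true = ([c], 1) := by simp [pvStep]
      rw [List.foldl_cons, List.foldl_cons, h1, h2, ih (pre ++ [c]) 1, ih [c] 1]
      simp

theorem pvRes_eq_specR (bl : List Bool) :
    ∀ c : Int, pvRes bl c = ((pvSpecR bl).headD 0 + c - 1) :: (pvSpecR bl).tail := by
  induction bl with
  | nil => intro c; simp [pvRes, pvSpecR]
  | cons b bl ih =>
    intro c
    cases b with
    | true =>
      have hstep : pvRes (true :: bl) c = c :: pvRes bl 1 := by
        have h2 : pvStep (([] : List Int), c) true = ([c], 1) := by simp [pvStep]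
        simp only [pvRes, List.foldl_cons, h2]
        rw [pvFoldl_prefix bl [c] 1]
        simp
      rw [hstep, ih 1]
      cases h : pvSpecR bl with
      | nil => exact absurd h (pvSpecR_ne_nil bl)
      | cons r rs =>
        simp [pvSpecR, h]
        try omega
    | false =>
      have hstep : pvRes (false :: bl) c = pvRes bl (c + 1) := by
        have h2 : pvStep (([] : List Int), c) false = ([], c + 1) := rfl
        simp only [pvRes, List.foldl_cons, h2]
      rw [hstep, ih (c + 1)]
      cases h : pvSpecR bl with
      | nil => exact absurd h (pvSpecR_ne_nil bl)
      | cons r rs =>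
        simp [pvSpecR, h]
        try omega

-- A's flag at position 1 + k is B's flag at index k
theorem pvP_shift (bs : List Int) (k : Nat) :
    pvP bs (1 + (k : Int)) = pvQ bs (0 + (k : Int)) := by
  simp only [pvP, pvQ]
  have h1 : (1 : Int) + (k : Int) - 1 = ((k : Nat) : Int) := by ring
  have h2 : (0 : Int) + (k : Int) = ((k : Nat) : Int) := by ring
  rw [h1, h2]

-- A's effective flag list equals B's
theorem pvFlags_eq (bs : List Int) (tl : Int) :
    (PySem.List.pyRange 1 tl 1).map (pvP bs) = pvFlags bs tl := by
  unfold pvFlags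
  rw [PySem.List.pyRange_one (1 : Int) tl, PySem.List.pyRange_one (0 : Int) (tl - 1)]
  have hlen : (tl - 1 - 0).toNat = (tl - 1).toNat := by omega
  rw [hlen, List.map_map, List.map_map]
  apply List.map_congr_left
  intro k _
  simpa using pvP_shift bs k

-- B's backward fold computes the reference recursion on the flag list
theorem pvFoldr_specR (bl : List Bool) :
    bl.foldr (fun b segs => pvBStep segs b) [1] = pvSpecR bl := by
  induction bl with
  | nil => rfl
  | cons b bl ih =>
    rw [List.foldr_cons, ih]
    cases b <;> simp [pvBStep, pvSpecR]

theorem pvAlt_eq_specR (bs : List Int) (tl : Int) (h : ¬ tl ≤ 0) :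
    boundaries_to_segments_py_alt bs tl = pvSpecR (pvFlags bs tl) := by
  rw [boundaries_to_segments_py_alt, if_neg h]
  have hrange : PySem.List.pyRange (tl - 2) (-1) (-1)
      = (PySem.List.pyRange 0 (tl - 1) 1).reverse := by
    rw [PySem.List.pyRange_neg_one_eq_reverse, show (-1 : Int) + 1 = 0 from rfl,
        show tl - 2 + 1 = tl - 1 from by ring]
  rw [hrange, List.foldl_reverse]
  unfold pvFlags
  rw [← pvFoldr_specR, List.foldr_map]
  rfl

theorem boundaries_to_segments_eq (boundaries : List Int) (total_length : Int) :
    boundaries_to_segments_py boundaries total_length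
      = boundaries_to_segments_py_alt boundaries total_length := by
  by_cases hT : total_length ≤ 0
  · rw [boundaries_to_segments_py, boundaries_to_segments_py_alt]
    simp [hT]
  · have hA : boundaries_to_segments_py boundaries total_length
        = pvRes ((PySem.List.pyRange 1 total_length 1).map (pvP boundaries)) 1 := by
      rw [boundaries_to_segments_py, if_neg hT]
      simp only [pvRes, List.foldl_map]
      rfl
    rw [hA, pvFlags_eq, pvRes_eq_specR _ 1, pvAlt_eq_specR boundaries total_length hT]
    cases h : pvSpecR (pvFlags boundaries total_length) with
    | nil => exact absurd h (pvSpecR_ne_nil _)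
    | cons r rs => simp

-- ===== VERDICT (by name: the statement is the Claim_ definition above) =====
theorem boundaries_to_segments_py_spec : Claim_equal_boundaries_to_segments_py := by
  intro boundaries total_length _
  exact boundaries_to_segments_eq boundaries total_length
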